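-- pv_equiv track=rewrite | github.com/CHRISTIANORJUELA/Metodos-iterativos | metodoSeidel.py | ordenarVariables
-- ===== SOURCE A (Python) =====
-- def ordenarVariables(listLetrasVariables):
--    listCadena = list();
--    listNewCadena = list();
--    for valor in listLetrasVariables:
--       for indice in valor:
--          if(indice.isdigit()):
--           listCadena.append(indice);
--    listCadena.sort();
--    for valor in listCadena:
--       valor += "x";
--       listNewCadena.append(valor[::-1]);
--       valor = valor[::-1];
--    return listNewCadena;
-- ===== SOURCE B (Python) =====
-- def ordenarVariables(listLetrasVariables):
--     counts = [0] * 10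
--     for valor in listLetrasVariables:
--         for ch in valor:
--             if ch.isdigit():
--                 counts[ord(ch) - 48] += 1
--     out = []
--     for d in range(10):
--         out.extend(["x" + str(d)] * counts[d])
--     return out
-- ===== Notes on version B (the rewrite author's own statement) =====
-- stated objective: alternative
-- what changed: Replaces collect-then-comparison-sort with a counting sort: one pass tallies each digit into a fixed 10-slot count array, then the output is emitted in digit order without calling sort.
import Mathlib
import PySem

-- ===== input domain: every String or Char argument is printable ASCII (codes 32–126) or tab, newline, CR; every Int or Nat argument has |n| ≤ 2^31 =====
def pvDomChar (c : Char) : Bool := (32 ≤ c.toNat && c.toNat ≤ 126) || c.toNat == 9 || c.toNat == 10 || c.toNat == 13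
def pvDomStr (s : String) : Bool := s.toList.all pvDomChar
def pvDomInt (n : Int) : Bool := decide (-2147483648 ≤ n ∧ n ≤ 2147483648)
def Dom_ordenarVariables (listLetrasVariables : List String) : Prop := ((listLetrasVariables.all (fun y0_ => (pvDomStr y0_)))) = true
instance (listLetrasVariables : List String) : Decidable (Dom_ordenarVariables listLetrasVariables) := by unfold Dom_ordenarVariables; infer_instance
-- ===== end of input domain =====

-- B replaces A's collect-then-comparison-sort with a counting sort over the fixed 10-digit alphabet (alternative algorithm, no sort call).

-- ===== PORT A =====
def ordenarVariables (listLetrasVariables : List String) : List String :=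
  let listCadena : List Char :=
    listLetrasVariables.foldl (fun acc valor =>
      valor.toList.foldl (fun acc2 indice =>
        if PySem.Chars.isdigit indice then acc2 ++ [indice] else acc2) acc) []
  let sortedCadena := PySem.List.sorted listCadena (fun x => x)
  sortedCadena.foldl (fun acc valor => acc ++ [String.ofList ((valor :: ['x']).reverse)]) []

-- ===== PORT B =====
def ordenarVariables_alt (listLetrasVariables : List String) : List String :=
  let counts : List Nat :=
    listLetrasVariables.foldl (fun cnt valor =>
      valor.toList.foldl (fun c ch =>
        if PySem.Chars.isdigit ch then c.set (ch.toNat - 48) (c.getD (ch.toNat - 48) 0 + 1) else c) cnt)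
      (List.replicate 10 0)
  (List.range 10).foldl (fun out d =>
    out ++ List.replicate (counts.getD d 0) (String.ofList ('x' :: PySem.Int.toChars (d : Int)))) []

-- ===== PRECONDITION & SPEC =====
def Spec_ordenarVariables (listLetrasVariables : List String) (out : List String) : Prop := out = ordenarVariables_alt listLetrasVariables
instance (listLetrasVariables : List String) (out : List String) : Decidable (Spec_ordenarVariables listLetrasVariables out) := by unfold Spec_ordenarVariables; infer_instance

-- ===== CLAIM (what is proved, stated in full; the proofs are below) =====
def Claim_equal_ordenarVariables : Prop := ∀ (listLetrasVariables : List String), Dom_ordenarVariables listLetrasVariables → Spec_ordenarVariables listLetrasVariables (ordenarVariables listLetrasVariables)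

-- ===== LEMMAS AND PROOFS =====

-- the character '0' + d
def pvDchar (d : Nat) : Char := Char.ofNat (48 + d)
-- the digit characters of the input, in encounter order (A's listCadena)
def pvDigits (xs : List String) : List Char := xs.flatMap (fun s => s.toList.filter PySem.Chars.isdigit)
-- the canonical count table B maintains
def pvCnt (cs : List Char) : List Nat := (List.range 10).map (fun d => cs.count (pvDchar d))

theorem pvIsdigit_iff (c : Char) : PySem.Chars.isdigit c = true ↔ 48 ≤ c.toNat ∧ c.toNat ≤ 57 := by
  rw [PySem.Chars.isdigit]
  rw [Bool.and_eq_true, decide_eq_true_iff, decide_eq_true_iff, Char.le_def, Char.le_def,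
      UInt32.le_iff_toNat_le, UInt32.le_iff_toNat_le]
  rfl

theorem pvDchar_toNat (d : Nat) (hd : d < 58) : (pvDchar d).toNat = 48 + d := by
  rw [pvDchar, Char.toNat_ofNat, if_pos (Or.inl (by omega))]

theorem pvDchar_eq_iff (d : Nat) (hd : d < 58) (c : Char) : pvDchar d = c ↔ 48 + d = c.toNat := by
  constructor
  · intro h
    rw [← h, pvDchar_toNat d hd]
  · intro h
    have h2 := Char.ofNat_toNat c
    rw [pvDchar, h, h2]

theorem pvA_eq (xs : List String) :
    ordenarVariables xs =
      (PySem.List.sorted (pvDigits xs) (fun x => x)).map (fun c => String.ofList ['x', c]) := by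
  unfold ordenarVariables pvDigits
  simp only [PySem.List.foldl_append_if, PySem.List.foldl_append_eq_flatMap,
    List.map_id', List.nil_append, List.reverse_cons, List.reverse_nil]
  simp only [List.cons_append, List.nil_append]
  rw [← List.map_eq_flatMap]

theorem pvCnt_getD (cs : List Char) (d : Nat) (hd : d < 10) :
    (pvCnt cs).getD d 0 = cs.count (pvDchar d) := by
  rw [pvCnt, List.getD_eq_getElem _ _ (by simpa using hd)]
  simp

theorem pvStep (cs : List Char) (ch : Char) (h : PySem.Chars.isdigit ch = true) :
    (pvCnt cs).set (ch.toNat - 48) ((pvCnt cs).getD (ch.toNat - 48) 0 + 1) = pvCnt (cs ++ [ch]) := by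
  obtain ⟨h1, h2⟩ := (pvIsdigit_iff ch).mp h
  have hk : ch.toNat - 48 < 10 := by omega
  have hv := pvCnt_getD cs (ch.toNat - 48) hk
  apply List.ext_getElem
  · simp [pvCnt]
  · intro i hi1 hi2
    have hi : i < 10 := by simpa [pvCnt] using hi2
    have hR : (pvCnt (cs ++ [ch]))[i]'hi2 = cs.count (pvDchar i) + (if ch = pvDchar i then 1 else 0) := by
      simp [pvCnt, List.count_append, List.count_cons, beq_iff_eq]
    rw [List.getElem_set, hR]
    by_cases hik : ch.toNat - 48 = i
    · have he : ch = pvDchar i := by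
        rw [eq_comm, pvDchar_eq_iff i (by omega)]
        omega
      rw [if_pos hik, if_pos he, hv, hik]
    · have he : ¬ ch = pvDchar i := by
        intro he
        rw [eq_comm, pvDchar_eq_iff i (by omega)] at he
        omega
      rw [if_neg hik, if_neg he]
      simp [pvCnt]

theorem pvInner (l : List Char) (cs : List Char) :
    l.foldl (fun c ch =>
        if PySem.Chars.isdigit ch then c.set (ch.toNat - 48) (c.getD (ch.toNat - 48) 0 + 1) else c)
      (pvCnt cs) = pvCnt (cs ++ l.filter PySem.Chars.isdigit) := by
  induction l generalizing cs with
  | nil => simp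
  | cons ch l ih =>
    by_cases h : PySem.Chars.isdigit ch
    · rw [List.foldl_cons, if_pos h, pvStep cs ch h, ih (cs ++ [ch]), List.filter_cons, if_pos h]
      simp
    · rw [List.foldl_cons, if_neg h, ih cs, List.filter_cons, if_neg h]

theorem pvCounts (xs : List String) (cs : List Char) :
    xs.foldl (fun cnt valor =>
        valor.toList.foldl (fun c ch =>
          if PySem.Chars.isdigit ch then c.set (ch.toNat - 48) (c.getD (ch.toNat - 48) 0 + 1) else c) cnt)
      (pvCnt cs) = pvCnt (cs ++ pvDigits xs) := by
  induction xs generalizing cs with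
  | nil => simp [pvDigits]
  | cons s xs ih =>
    simp only [List.foldl_cons]
    rw [pvInner, ih]
    simp [pvDigits]

theorem pvDchar_le (d e : Nat) (hde : d ≤ e) (he : e < 58) : pvDchar d ≤ pvDchar e := by
  rw [Char.le_def, UInt32.le_iff_toNat_le]
  show (pvDchar d).toNat ≤ (pvDchar e).toNat
  rw [pvDchar_toNat d (by omega), pvDchar_toNat e he]
  omega

theorem pvPairwise_blocks (n : Nat → Nat) (l : List Nat) (hp : l.Pairwise (· < ·))
    (hb : ∀ d ∈ l, d < 58) :
    (l.flatMap (fun d => List.replicate (n d) (pvDchar d))).Pairwise (· ≤ ·) := by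
  induction l with
  | nil => simp
  | cons d l ih =>
    rw [List.flatMap_cons, List.pairwise_append]
    refine ⟨?_, ih hp.of_cons (fun e he => hb e (List.mem_cons_of_mem _ he)), ?_⟩
    · rw [List.pairwise_replicate]
      right
      exact le_refl _
    · intro x hx y hy
      rw [List.mem_replicate] at hx
      rw [List.mem_flatMap] at hy
      obtain ⟨e, hel, hy⟩ := hy
      rw [List.mem_replicate] at hy
      rw [hx.2, hy.2]
      exact pvDchar_le d e (le_of_lt (List.rel_of_pairwise_cons hp hel)) (hb e (List.mem_cons_of_mem _ hel))

theorem pvSorted_digits (cs : List Char) (h : ∀ c ∈ cs, PySem.Chars.isdigit c = true) :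
    PySem.List.sorted cs (fun x => x) =
      (List.range 10).flatMap (fun d => List.replicate (cs.count (pvDchar d)) (pvDchar d)) := by
  have hr : List.range 10 = [0,1,2,3,4,5,6,7,8,9] := by decide
  apply PySem.List.sorted_id_eq_of_perm_of_pairwise
  · rw [List.perm_iff_count]
    intro a
    rw [hr]
    simp only [List.flatMap_cons, List.flatMap_nil, List.append_nil, List.count_append,
      List.count_replicate, beq_iff_eq]
    by_cases ha : PySem.Chars.isdigit a
    · obtain ⟨b1, b2⟩ := (pvIsdigit_iff a).mp ha
      have hak : pvDchar (a.toNat - 48) = a := by rw [pvDchar_eq_iff _ (by omega)]; omega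
      have h10 : a.toNat - 48 < 10 := by omega
      interval_cases h' : (a.toNat - 48) <;> rw [← hak] <;> simp [pvDchar]
    · have hz : ∀ d : Nat, d < 10 → pvDchar d ≠ a := by
        intro d hd he
        rw [pvDchar_eq_iff d (by omega)] at he
        rw [pvIsdigit_iff] at ha
        omega
      have hcnt : cs.count a = 0 := by
        rw [List.count_eq_zero]
        intro hmem
        exact ha (h a hmem)
      rw [hcnt,
        if_neg (hz 0 (by omega)), if_neg (hz 1 (by omega)), if_neg (hz 2 (by omega)),
        if_neg (hz 3 (by omega)), if_neg (hz 4 (by omega)), if_neg (hz 5 (by omega)),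
        if_neg (hz 6 (by omega)), if_neg (hz 7 (by omega)), if_neg (hz 8 (by omega)),
        if_neg (hz 9 (by omega))]
  · exact pvPairwise_blocks _ (List.range 10) (List.pairwise_lt_range)
      (fun d hd => by have := List.mem_range.mp hd; omega)

theorem pvDigits_all (xs : List String) : ∀ c ∈ pvDigits xs, PySem.Chars.isdigit c = true := by
  intro c hc
  simp only [pvDigits, List.mem_flatMap, List.mem_filter] at hc
  obtain ⟨s, _, _, hd⟩ := hc
  exact hd

theorem pvToChars_digit (d : Nat) (hd : d < 10) :
    PySem.Int.toChars (d : Int) = [pvDchar d] := by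
  interval_cases d <;> decide

-- ===== VERDICT (by name: the statement is the Claim_ definition above) =====
theorem ordenarVariables_spec : Claim_equal_ordenarVariables := by
  intro xs _
  unfold Spec_ordenarVariables ordenarVariables_alt
  have hc0 : List.replicate 10 0 = pvCnt [] := by decide
  rw [hc0, pvCounts, List.nil_append]
  rw [PySem.List.foldl_append_eq_flatMap]
  rw [List.nil_append]
  rw [pvA_eq, pvSorted_digits _ (pvDigits_all xs), List.map_flatMap]
  apply List.flatMap_congr
  intro d hd
  have hd10 : d < 10 := List.mem_range.mp hd
  rw [List.map_replicate, pvCnt_getD _ d hd10, pvToChars_digit d hd10]
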